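-- pv_equiv track=rewrite | github.com/giuseppechessa/FaultCo-SimulationDemo | SNNCode/EndToEndInference/PackageGenerator.py | build_combined_actual_connections
-- ===== SOURCE A (Python) =====
-- from collections import defaultdict, Counter
--
-- def build_combined_actual_connections(hardware_packages, self_communication_connections):
--     """
--     Build actual connections from both hardware packages and self-communication connections
--
--     Args:
--         hardware_packages: List[Dict]
--         self_communication_connections: Dict[int, List[Dict]] - every data item is: {'source': global_idx, 'destination': dest_global_idx, 'time_step': t}
--
--     Returns:
--         Dict[int, Counter] - {dest_global_idx: Counter({source1: count1, source2: count2, ...})}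
--     """
--
--     # Use Counter to process the duplicate connections
--     actual = defaultdict(Counter)
--
--     # Add hardware package connections
--     if hardware_packages:
--         for pkg in hardware_packages:
--             source_global = pkg['source']
--             dest_global = pkg['destination']
--             # actual[dest_global].add(source_global)
--             actual[dest_global][source_global] += 1
--
--     # Add self-communication connections
--     if self_communication_connections:
--         for core_id, connections in self_communication_connections.items():
--             for conn in connections:
--                 source_global = conn['source']
--                 dest_global = conn['destination']
--                 # actual[dest_global].add(source_global)
--                 actual[dest_global][source_global] += 1
--
--     return dict(actual)
-- ===== SOURCE B (Python) =====
-- from collections import Counter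
--
-- def build_combined_actual_connections(hardware_packages, self_communication_connections):
--     # Flat strategy: instead of a nested dict-of-Counters updated in place,
--     # count (destination, source) PAIRS in one global Counter, then regroup
--     # the already-final pair counts into per-destination Counters.
--     pairs = [(c['destination'], c['source']) for c in hardware_packages]
--     for conns in self_communication_connections.values():
--         pairs.extend((c['destination'], c['source']) for c in conns)
--     result = {}
--     for (dest, src), n in Counter(pairs).items():
--         result.setdefault(dest, Counter())[src] = n
--     return result
-- ===== Notes on version B (the rewrite author's own statement) =====
-- stated objective: alternative
-- what changed: B counts flat (destination, source) pairs in one global Counter and then regroups the finished pair counts into per-destination Counters, instead of A's nested defaultdict(Counter) incremented per destination in place.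
import Mathlib
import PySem

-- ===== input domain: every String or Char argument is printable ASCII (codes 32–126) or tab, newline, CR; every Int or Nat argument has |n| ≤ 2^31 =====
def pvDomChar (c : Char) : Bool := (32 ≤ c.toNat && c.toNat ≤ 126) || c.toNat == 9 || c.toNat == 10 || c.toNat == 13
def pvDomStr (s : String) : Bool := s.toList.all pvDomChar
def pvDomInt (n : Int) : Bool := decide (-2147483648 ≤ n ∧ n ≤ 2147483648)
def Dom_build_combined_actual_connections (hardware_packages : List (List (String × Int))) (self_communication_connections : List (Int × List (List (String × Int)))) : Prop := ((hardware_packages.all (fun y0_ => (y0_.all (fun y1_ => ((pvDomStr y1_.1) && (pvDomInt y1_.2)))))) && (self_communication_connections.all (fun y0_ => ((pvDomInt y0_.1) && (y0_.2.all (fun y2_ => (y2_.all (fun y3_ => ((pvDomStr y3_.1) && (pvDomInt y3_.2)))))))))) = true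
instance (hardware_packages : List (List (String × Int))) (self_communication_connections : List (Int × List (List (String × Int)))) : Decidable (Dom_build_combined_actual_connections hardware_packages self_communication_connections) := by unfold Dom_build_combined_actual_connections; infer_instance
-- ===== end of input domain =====

-- B counts flat (destination, source) pairs in one global Counter and regroups the
-- finished pair counts per destination, instead of A's in-place nested dict-of-Counters.

-- ===== PORT A =====
-- conn[k]: Python dict access; Pre_ guarantees the key is present (else Python raises KeyError)
def pvConnGet (conn : List (String × Int)) (k : String) : Int :=
  ((PySem.Dict.ofList conn).get? k).getD 0

-- actual[dest_global][source_global] += 1 on a defaultdict(Counter)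
def bcacStep (acc : PySem.Dict Int (PySem.Dict Int Int)) (conn : List (String × Int)) :
    PySem.Dict Int (PySem.Dict Int Int) :=
  acc.modify (pvConnGet conn "destination") PySem.Dict.empty
    (fun c => c.modify (pvConnGet conn "source") 0 (· + 1))

def build_combined_actual_connections (hardware_packages : List (List (String × Int))) (self_communication_connections : List (Int × List (List (String × Int)))) : List (Int × List (Int × Int)) :=
  -- for pkg in hardware_packages: actual[pkg['destination']][pkg['source']] += 1
  let d1 := hardware_packages.foldl bcacStep PySem.Dict.empty
  -- for core_id, connections in self_communication_connections.items(): for conn in connections: …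
  let d2 := ((PySem.Dict.ofList self_communication_connections).items).foldl
    (fun acc p => p.2.foldl bcacStep acc) d1
  -- return dict(actual)
  d2.items.map (fun p => (p.1, p.2.items))

-- ===== PORT B =====
-- (c['destination'], c['source'])
def bcacPair (c : List (String × Int)) : Int × Int :=
  (pvConnGet c "destination", pvConnGet c "source")

-- result.setdefault(dest, Counter())[src] = n  (setdefault, then item assignment on the inner Counter)
def bcacRegroup (r : PySem.Dict Int (PySem.Dict Int Int)) (x : (Int × Int) × Int) :
    PySem.Dict Int (PySem.Dict Int Int) :=
  r.modify x.1.1 PySem.Dict.empty (fun c => c.insert x.1.2 x.2)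

def build_combined_actual_connections_alt (hardware_packages : List (List (String × Int))) (self_communication_connections : List (Int × List (List (String × Int)))) : List (Int × List (Int × Int)) :=
  -- pairs = [(c['destination'], c['source']) for c in hardware_packages]
  -- for conns in self_communication_connections.values(): pairs.extend(…)
  let pairs := ((PySem.Dict.ofList self_communication_connections).values).foldl
    (fun acc cs => acc ++ cs.map bcacPair) (hardware_packages.map bcacPair)
  -- for (dest, src), n in Counter(pairs).items(): result.setdefault(dest, Counter())[src] = n
  let result := (PySem.Dict.counter pairs).items.foldl bcacRegroup PySem.Dict.empty
  result.items.map (fun p => (p.1, p.2.items))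

-- ===== PRECONDITION & SPEC =====
-- Pre_ excludes exactly the inputs where a processed connection dict lacks a
-- 'source' or 'destination' key, on which Python A raises KeyError.
def Pre_build_combined_actual_connections (hardware_packages : List (List (String × Int))) (self_communication_connections : List (Int × List (List (String × Int)))) : Prop :=
  (∀ pkg ∈ hardware_packages,
      (PySem.Dict.ofList pkg).contains "source" = true ∧
      (PySem.Dict.ofList pkg).contains "destination" = true) ∧
  (∀ cs ∈ (PySem.Dict.ofList self_communication_connections).values, ∀ c ∈ cs,
      (PySem.Dict.ofList c).contains "source" = true ∧
      (PySem.Dict.ofList c).contains "destination" = true)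
instance (hardware_packages : List (List (String × Int))) (self_communication_connections : List (Int × List (List (String × Int)))) : Decidable (Pre_build_combined_actual_connections hardware_packages self_communication_connections) := by unfold Pre_build_combined_actual_connections; infer_instance

def pvWitness_build_combined_actual_connections : (List (List (String × Int))) × (List (Int × List (List (String × Int)))) :=
  ([[("source", 1), ("destination", 2)]],
   [(0, [[("source", 1), ("destination", 2)], [("source", 3), ("destination", 2)]])])

def Spec_build_combined_actual_connections (hardware_packages : List (List (String × Int))) (self_communication_connections : List (Int × List (List (String × Int)))) (out : List (Int × List (Int × Int))) : Prop := out = build_combined_actual_connections_alt hardware_packages self_communication_connections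
instance (hardware_packages : List (List (String × Int))) (self_communication_connections : List (Int × List (List (String × Int)))) (out : List (Int × List (Int × Int))) : Decidable (Spec_build_combined_actual_connections hardware_packages self_communication_connections out) := by unfold Spec_build_combined_actual_connections; infer_instance

-- ===== CLAIM (what is proved, stated in full; the proofs are below) =====
def Claim_equal_build_combined_actual_connections : Prop := ∀ (hardware_packages : List (List (String × Int))) (self_communication_connections : List (Int × List (List (String × Int)))), Dom_build_combined_actual_connections hardware_packages self_communication_connections → Pre_build_combined_actual_connections hardware_packages self_communication_connections → Spec_build_combined_actual_connections hardware_packages self_communication_connections (build_combined_actual_connections hardware_packages self_communication_connections)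

-- ===== LEMMAS AND PROOFS =====

-- pair-level version of A's loop body (proof-only)
def bcacStepP (d : PySem.Dict Int (PySem.Dict Int Int)) (p : Int × Int) : PySem.Dict Int (PySem.Dict Int Int) :=
  d.modify p.1 PySem.Dict.empty (fun c => c.modify p.2 0 (· + 1))

lemma bcac_inner_flatMap (l : List (Int × List (List (String × Int))))
    (d : PySem.Dict Int (PySem.Dict Int Int)) :
    l.foldl (fun acc p => p.2.foldl bcacStep acc) d = (l.flatMap (·.2)).foldl bcacStep d := by
  induction l generalizing d with
  | nil => rfl
  | cons h t ih => simp [List.foldl_append, ih]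

lemma bcac_step_map (l : List (List (String × Int))) (d : PySem.Dict Int (PySem.Dict Int Int)) :
    l.foldl bcacStep d = (l.map bcacPair).foldl bcacStepP d := by
  rw [List.foldl_map]; rfl

lemma bcac_getD_step (ps : List (Int × Int)) (d : PySem.Dict Int (PySem.Dict Int Int)) (k : Int) :
    (ps.foldl bcacStepP d).getD k PySem.Dict.empty =
      ((ps.filter (fun p => p.1 == k)).map (·.2)).foldl
        (fun c s => c.modify s 0 (· + 1)) (d.getD k PySem.Dict.empty) := by
  induction ps generalizing d with
  | nil => rfl
  | cons p t ih =>
    simp only [List.foldl_cons, ih, bcacStepP, PySem.Dict.getD_modify]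
    by_cases hk : p.1 = k
    · simp [hk]
    · rw [if_neg (Ne.symm hk)]
      simp [hk]

lemma bcac_getD_regroup (L : List ((Int × Int) × Int)) (r : PySem.Dict Int (PySem.Dict Int Int)) (k : Int) :
    (L.foldl bcacRegroup r).getD k PySem.Dict.empty =
      (L.filter (fun x => x.1.1 == k)).foldl
        (fun c x => c.insert x.1.2 x.2) (r.getD k PySem.Dict.empty) := by
  induction L generalizing r with
  | nil => rfl
  | cons x t ih =>
    simp only [List.foldl_cons, ih, bcacRegroup, PySem.Dict.getD_modify]
    by_cases hk : x.1.1 = k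
    · simp [hk]
    · rw [if_neg (Ne.symm hk)]
      simp [hk]

-- Set.ofList over an appended singleton
lemma bcac_ofList_concat {α : Type} [BEq α] [LawfulBEq α] (l : List α) (a : α) :
    PySem.Set.ofList (l ++ [a]) = PySem.Set.add (PySem.Set.ofList l) a := by
  rw [PySem.Set.ofList_eq_foldl, PySem.Set.ofList_eq_foldl, List.foldl_append]
  rfl

lemma bcac_add_of_mem {α : Type} [BEq α] [LawfulBEq α] (s : List α) (a : α) (h : a ∈ s) :
    PySem.Set.add s a = s := by
  simp [PySem.Set.add, PySem.Set.contains, h]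

lemma bcac_add_of_not_mem {α : Type} [BEq α] [LawfulBEq α] (s : List α) (a : α) (h : ¬ a ∈ s) :
    PySem.Set.add s a = s ++ [a] := by
  simp [PySem.Set.add, PySem.Set.contains, h]

-- deduplicating before mapping changes nothing for the deduplicated mapped list
lemma bcac_ofList_map_ofList {α β : Type} [BEq α] [LawfulBEq α] [BEq β] [LawfulBEq β]
    (f : α → β) (l : List α) :
    PySem.Set.ofList ((PySem.Set.ofList l).map f) = PySem.Set.ofList (l.map f) := by
  induction l using List.reverseRecOn with
  | nil => rfl
  | append_singleton t a ih =>
    rw [bcac_ofList_concat, List.map_append, List.map_singleton, bcac_ofList_concat]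
    by_cases h : a ∈ t
    · rw [bcac_add_of_mem _ _ (by rw [PySem.Set.mem_ofList]; exact h)]
      rw [bcac_add_of_mem, ih]
      rw [PySem.Set.mem_ofList]
      exact List.mem_map_of_mem h
    · rw [bcac_add_of_not_mem _ _ (by rw [PySem.Set.mem_ofList]; exact h),
          List.map_append, List.map_singleton, bcac_ofList_concat, ih]

-- filtering the dedup of pairs at first component k, then taking sources,
-- is the dedup of the sources filtered at k
lemma bcac_filter_ofList (ps : List (Int × Int)) (k : Int) :
    ((PySem.Set.ofList ps).filter (fun q => q.1 == k)).map (·.2) =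
      PySem.Set.ofList ((ps.filter (fun q => q.1 == k)).map (·.2)) := by
  induction ps using List.reverseRecOn with
  | nil => rfl
  | append_singleton t a ih =>
    rw [bcac_ofList_concat, List.filter_append, List.map_append]
    by_cases hm : a ∈ t
    · rw [bcac_add_of_mem _ _ (by rw [PySem.Set.mem_ofList]; exact hm)]
      by_cases hk : a.1 = k
      · have h2 : a.2 ∈ (t.filter (fun q => q.1 == k)).map (·.2) :=
          List.mem_map_of_mem (List.mem_filter.2 ⟨hm, by simp [hk]⟩)
        simp only [List.filter_cons, List.filter_nil]
        rw [if_pos (by simp [hk]), List.map_cons, List.map_nil, bcac_ofList_concat,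
            bcac_add_of_mem _ _ (by rw [PySem.Set.mem_ofList]; exact h2), ih]
      · simp only [List.filter_cons, List.filter_nil]
        rw [if_neg (by simp [hk])]
        simpa using ih
    · rw [bcac_add_of_not_mem _ _ (by rw [PySem.Set.mem_ofList]; exact hm)]
      by_cases hk : a.1 = k
      · have h2 : ¬ a.2 ∈ (t.filter (fun q => q.1 == k)).map (·.2) := by
          intro hmem
          rcases List.mem_map.1 hmem with ⟨q, hq, hq2⟩
          rcases List.mem_filter.1 hq with ⟨hqt, hqk⟩
          have : q = a := by
            rcases q with ⟨q1, q2⟩; rcases a with ⟨a1, a2⟩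
            simp at hqk hq2 hk ⊢
            exact ⟨hqk.trans hk.symm, hq2⟩
          exact hm (this ▸ hqt)
        simp only [List.filter_append, List.filter_cons, List.filter_nil]
        rw [if_pos (by simp [hk])]
        simp only [List.map_append, List.map_cons, List.map_nil]
        rw [bcac_ofList_concat, bcac_add_of_not_mem _ _ (by rw [PySem.Set.mem_ofList]; exact h2), ih]
      · simp only [List.filter_append, List.filter_cons, List.filter_nil]
        rw [if_neg (by simp [hk])]
        simpa using ih

-- the count of a pair (k, s) in ps equals the count of s among sources with destination k
lemma bcac_count_pair (ps : List (Int × Int)) (k s : Int) :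
    ps.count (k, s) = ((ps.filter (fun q => q.1 == k)).map (·.2)).count s := by
  induction ps with
  | nil => rfl
  | cons p t ih =>
    rcases p with ⟨p1, p2⟩
    by_cases h1 : p1 = k
    · subst h1
      by_cases h2 : p2 = s
      · subst h2
        simp [ih]
      · simp only [List.filter_cons]
        rw [if_pos (by simp)]
        simp [h2, ih]
    · simp only [List.filter_cons]
      rw [if_neg (by simp [h1])]
      simp [ih, h1]

-- the central identity: A's nested counting fold equals B's regrouped global pair counter
lemma bcac_main (ps : List (Int × Int)) :
    (ps.foldl bcacStepP PySem.Dict.empty).items.map (fun p => (p.1, p.2.items)) =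
      (((PySem.Dict.counter ps).items).foldl bcacRegroup PySem.Dict.empty).items.map
        (fun p => (p.1, p.2.items)) := by
  have hkA : (ps.foldl bcacStepP PySem.Dict.empty).keys
      = PySem.Set.update (PySem.Dict.empty.keys) (ps.map (·.1)) :=
    PySem.Dict.keys_foldl_modify_key ps (·.1) PySem.Dict.empty
      (fun _ p c => c.modify p.2 0 (· + 1)) PySem.Dict.empty
  have hkB : (((PySem.Dict.counter ps).items).foldl bcacRegroup PySem.Dict.empty).keys
      = PySem.Set.update (PySem.Dict.empty.keys) (((PySem.Dict.counter ps).items).map (fun x => x.1.1)) :=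
    PySem.Dict.keys_foldl_modify_key ((PySem.Dict.counter ps).items)
      (fun (x : (Int × Int) × Int) => x.1.1) PySem.Dict.empty
      (fun _ (x : (Int × Int) × Int) c => c.insert x.1.2 x.2) PySem.Dict.empty
  have hndA : (ps.foldl bcacStepP PySem.Dict.empty).keys.Nodup :=
    PySem.Dict.nodup_keys_foldl_modify_key ps (·.1) PySem.Dict.empty
      (fun _ p c => c.modify p.2 0 (· + 1)) PySem.Dict.empty (by simp)
  have hndB : (((PySem.Dict.counter ps).items).foldl bcacRegroup PySem.Dict.empty).keys.Nodup :=
    PySem.Dict.nodup_keys_foldl_modify_key ((PySem.Dict.counter ps).items)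
      (fun (x : (Int × Int) × Int) => x.1.1) PySem.Dict.empty
      (fun _ (x : (Int × Int) × Int) c => c.insert x.1.2 x.2) PySem.Dict.empty (by simp)
  have hkeys : (((PySem.Dict.counter ps).items).map (·.1.1)) =
      ((PySem.Set.ofList ps).map (·.1)) := by
    rw [PySem.Dict.items_counter]
    simp [List.map_map, Function.comp]
  rw [PySem.Dict.items_eq_map_keys _ hndA PySem.Dict.empty,
      PySem.Dict.items_eq_map_keys _ hndB PySem.Dict.empty, hkA, hkB, hkeys,
      List.map_map, List.map_map]
  have hupd : ∀ (l : List Int),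
      PySem.Set.update ((PySem.Dict.empty : PySem.Dict Int (PySem.Dict Int Int)).keys) l
        = PySem.Set.ofList l := by
    intro l; rw [PySem.Set.ofList_eq_foldl]; rfl
  rw [hupd, hupd, bcac_ofList_map_ofList]
  refine List.map_congr_left (fun k hk => ?_)
  simp only [Function.comp]
  congr 1
  -- per-key values agree
  rw [bcac_getD_step, bcac_getD_regroup]
  simp only [PySem.Dict.getD_empty]
  rw [show (fun (c : PySem.Dict Int Int) s => c.modify s 0 (· + 1)) =
        (fun (d : PySem.Dict Int Int) x => d.modify x 0 (· + 1)) from rfl,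
      ← PySem.Dict.counter_eq_foldl]
  -- B side: the filtered counter items form a fresh-key insert loop over distinct sources
  set Lk := (PySem.Set.ofList ps).filter (fun q => q.1 == k) with hLk
  have hmemLk : ∀ q ∈ Lk, q.1 = k ∧ q ∈ ps := by
    intro q hq
    rcases List.mem_filter.1 hq with ⟨hq1, hq2⟩
    exact ⟨by simpa using hq2, (PySem.Set.mem_ofList _ _).1 hq1⟩
  have hnodupLk : (Lk.map (·.2)).Nodup := by
    refine List.Nodup.map_on ?_ (List.Nodup.filter _ (PySem.Set.nodup_ofList ps))
    intro x hx y hy hxy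
    rcases hmemLk x hx with ⟨hx1, _⟩
    rcases hmemLk y hy with ⟨hy1, _⟩
    rcases x with ⟨x1, x2⟩; rcases y with ⟨y1, y2⟩
    simp at hx1 hy1 hxy ⊢
    exact ⟨hx1.trans hy1.symm, hxy⟩
  have hBfilter : (((PySem.Dict.counter ps).items).filter (fun x => x.1.1 == k))
      = Lk.map (fun q => (q, (ps.count q : Int))) := by
    rw [PySem.Dict.items_counter, List.filter_map]; rfl
  have hfresh : (List.foldl (fun c x => c.insert x.1.2 x.2) PySem.Dict.empty
        (Lk.map (fun q => (q, (ps.count q : Int))))).items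
      = (PySem.Dict.empty : PySem.Dict Int Int).items
          ++ (Lk.map (fun q => (q, (ps.count q : Int)))).map (fun x => (x.1.2, x.2)) :=
    PySem.Dict.items_foldl_insert_fresh (Lk.map (fun q => (q, (ps.count q : Int))))
      (fun (x : (Int × Int) × Int) => x.1.2) (fun (x : (Int × Int) × Int) => x.2)
      PySem.Dict.empty (by intro a _; simp)
      (by rw [List.map_map]; exact hnodupLk)
  rw [hBfilter, hfresh]
  -- both sides are maps over the deduplicated sources with matching counts
  rw [PySem.Dict.items_counter, ← bcac_filter_ofList, ← hLk, List.map_map, List.map_map]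
  simp only [PySem.Dict.empty, List.nil_append]
  refine List.map_congr_left (fun q hq => ?_)
  rcases hmemLk q hq with ⟨hq1, _⟩
  simp only [Function.comp]
  congr 1
  rw [show q = (k, q.2) from by rw [← hq1], bcac_count_pair]

-- ===== VERDICT (by name: the statement is the Claim_ definition above) =====
theorem build_combined_actual_connections_spec : Claim_equal_build_combined_actual_connections := by
  intro hp scc _ _
  unfold Spec_build_combined_actual_connections
  unfold build_combined_actual_connections build_combined_actual_connections_alt
  dsimp only
  rw [bcac_inner_flatMap, ← List.foldl_append, bcac_step_map]
  have hfold := PySem.List.foldl_append_eq_flatMap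
    (fun cs : List (List (String × Int)) => cs.map bcacPair)
    ((PySem.Dict.ofList scc).values) (hp.map bcacPair)
  rw [hfold]
  have hv : (PySem.Dict.ofList scc).values.flatMap (fun cs => cs.map bcacPair)
      = ((PySem.Dict.ofList scc).items.flatMap (·.2)).map bcacPair := by
    simp [PySem.Dict.values, List.flatMap_map, List.map_flatMap]
  rw [hv, ← List.map_append, bcac_main]
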